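-- pv_equiv track=rewrite | github.com/bbbkl/python | id_grabber/tarjan.py | tarjan_recursive
-- ===== SOURCE A (Python) =====
-- def tarjan_recursive(g):
--     """ Returns the strongly connected components of the graph @g
--         in a topological order.
--
--             @g is the graph represented as a dictionary
--                     { <vertex> : <successors of vertex> }.
--
--         This function recurses --- large graphs may cause a stack
--         overflow. """
--     S = []
--     S_set = set()
--     index = {}
--     lowlink = {}
--     ret = []
--
--     def visit(v):
--         index[v] = len(index)
--         lowlink[v] = index[v]
--         S.append(v)
--         S_set.add(v)
--         for w in g.get(v,()):
--             if w not in index: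
--                 visit(w)
--                 lowlink[v] = min(lowlink[w], lowlink[v])
--             elif w in S_set:
--                 lowlink[v] = min(lowlink[v], index[w])
--         if lowlink[v] == index[v]:
--             scc = []
--             w = None
--             while v != w:
--                 w = S.pop()
--                 scc.append(w)
--                 S_set.remove(w)
--             ret.append(scc)
--
--     for v in g:
--         if not v in index:
--             visit(v)
--     return ret
-- ===== SOURCE B (Python) =====
-- def tarjan_recursive(g):
--     """Iterative Tarjan SCC (explicit frame stack instead of recursion);
--     same components in the same topological order as the recursive version."""
--     S = []
--     S_set = set()
--     index = {}
--     lowlink = {}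
--     ret = []
--
--     for root in g:
--         if root in index:
--             continue
--         index[root] = len(index)
--         lowlink[root] = index[root]
--         S.append(root)
--         S_set.add(root)
--         stack = [(root, iter(g.get(root, ())))]
--         while stack:
--             v, it = stack[-1]
--             pushed = False
--             for w in it:
--                 if w not in index:
--                     index[w] = len(index)
--                     lowlink[w] = index[w]
--                     S.append(w)
--                     S_set.add(w)
--                     stack.append((w, iter(g.get(w, ()))))
--                     pushed = True
--                     break
--                 elif w in S_set:
--                     lowlink[v] = min(lowlink[v], index[w])
--             if pushed:
--                 continue
--             if lowlink[v] == index[v]: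
--                 scc = []
--                 w = None
--                 while v != w:
--                     w = S.pop()
--                     scc.append(w)
--                     S_set.remove(w)
--                 ret.append(scc)
--             stack.pop()
--             if stack:
--                 p = stack[-1][0]
--                 lowlink[p] = min(lowlink[v], lowlink[p])
--     return ret
-- ===== Notes on version B (the rewrite author's own statement) =====
-- stated objective: alternative
-- what changed: A's recursive Tarjan visit() is replaced by an iterative Tarjan driven by an explicit work stack of (vertex, remaining-successors) frames, with the parent lowlink min-update performed when a child frame is popped; output (components, order, tie-breaking) is identical.
import Mathlib
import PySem

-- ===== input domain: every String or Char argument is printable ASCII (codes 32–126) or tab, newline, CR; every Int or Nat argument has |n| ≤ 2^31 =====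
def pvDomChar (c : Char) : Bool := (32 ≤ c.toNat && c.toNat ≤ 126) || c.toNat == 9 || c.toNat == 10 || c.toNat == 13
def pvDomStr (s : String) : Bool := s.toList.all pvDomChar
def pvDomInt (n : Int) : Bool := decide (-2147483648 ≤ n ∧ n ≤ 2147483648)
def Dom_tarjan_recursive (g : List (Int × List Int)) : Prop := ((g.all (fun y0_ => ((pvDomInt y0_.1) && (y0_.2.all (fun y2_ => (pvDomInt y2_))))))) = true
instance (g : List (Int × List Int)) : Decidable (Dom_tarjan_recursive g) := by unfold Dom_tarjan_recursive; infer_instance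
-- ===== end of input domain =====

-- B replaces A's recursive Tarjan visit by an iterative one driven by an explicit
-- work stack of (vertex, remaining-successors) frames; same output, no recursion.

-- ===== PORT A =====
-- Shared state of the algorithm (both Pythons mutate exactly these five locals).
structure TjSt where
  S : List Int
  sset : PySem.Set Int
  index : PySem.Dict Int Int
  low : PySem.Dict Int Int
  ret : List (List Int)
deriving Repr, DecidableEq

def tjSt0 : TjSt := ⟨[], PySem.Set.empty, PySem.Dict.empty, PySem.Dict.empty, []⟩

-- g.get(v, ())
def tjSuccs (d : PySem.Dict Int (List Int)) (v : Int) : List Int := d.getD v []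

-- index[v] = len(index); lowlink[v] = index[v]; S.append(v); S_set.add(v)
def tjReg (v : Int) (st : TjSt) : TjSt :=
  { st with index := st.index.insert v (st.index.size),
            low := st.low.insert v (st.index.size),
            S := st.S ++ [v],
            sset := st.sset.add v }

-- lowlink[v] = min(lowlink[w], lowlink[v])   (lowlink reads are exact: both keys are
-- always present when this runs; getD's default is never used on a reachable state)
def tjMinLow (v w : Int) (st : TjSt) : TjSt :=
  { st with low := st.low.insert v (min (st.low.getD w 0) (st.low.getD v 0)) }

-- lowlink[v] = min(lowlink[v], index[w])
def tjMinIdx (v w : Int) (st : TjSt) : TjSt :=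
  { st with low := st.low.insert v (min (st.low.getD v 0) (st.index.getD w 0)) }

-- w = S.pop(); scc.append(w); S_set.remove(w)  until w == v; runs on S reversed
-- (S.pop pops the last element; v is always on S here, so the [] case and
-- Set.discard-for-remove are exact on every reachable state)
def tjPopRev (v : Int) : List Int → List Int → PySem.Set Int → List Int × List Int × PySem.Set Int
  | [], scc, ss => ([], scc, ss)
  | w :: rest, scc, ss =>
    if w = v then (rest, scc ++ [w], PySem.Set.discard ss w)
    else tjPopRev v rest (scc ++ [w]) (PySem.Set.discard ss w)

-- if lowlink[v] == index[v]: pop the component off S and append it to ret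
def tjFin (v : Int) (st : TjSt) : TjSt :=
  if st.low.getD v 0 = st.index.getD v 0 then
    let r := tjPopRev v st.S.reverse [] st.sset
    { st with S := r.1.reverse, sset := r.2.2, ret := st.ret ++ [r.2.1] }
  else st

-- A's recursive visit, fuel-threaded (one fuel unit per call; returns abort flag,
-- state, leftover fuel).  The fuel used at top level always suffices, see tjFuel.
mutual
def tjVisit (d : PySem.Dict Int (List Int)) : Nat → Int → TjSt → Bool × TjSt × Nat
  | 0, _, st => (true, st, 0)
  | f + 1, v, st =>
    match tjLoop d f v (tjSuccs d v) (tjReg v st) with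
    | (true, stA, fA) => (true, stA, fA)
    | (false, st2, f2) => (false, tjFin v st2, f2)
termination_by f _ _ => (f, 0)
decreasing_by exact Prod.Lex.left _ _ (Nat.lt_succ_self f)

def tjLoop (d : PySem.Dict Int (List Int)) : Nat → Int → List Int → TjSt → Bool × TjSt × Nat
  | f, _, [], st => (false, st, f)
  | f, v, w :: ws, st =>
    if ¬ st.index.contains w then
      match tjVisit d f w st with
      | (true, stA, fA) => (true, stA, fA)
      | (false, st', f') => tjLoop d (min f' f) v ws (tjMinLow v w st')
    else if st.sset.contains w then tjLoop d f v ws (tjMinIdx v w st)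
    else tjLoop d f v ws st
termination_by f _ ws _ => (f, ws.length + 1)
decreasing_by
  · exact Prod.Lex.right _ (by simp)
  · rcases Nat.lt_or_ge (min f' f) f with h | h
    · exact Prod.Lex.left _ _ h
    · have h2 : min f' f = f := Nat.le_antisymm (Nat.min_le_right _ _) h
      rw [h2]; exact Prod.Lex.right _ (by simp)
  · exact Prod.Lex.right _ (by simp)
  · exact Prod.Lex.right _ (by simp)
end

-- number of visit calls is bounded by the number of keys plus all successor
-- occurrences, so this fuel is always sufficient
def tjFuel (g : List (Int × List Int)) : Nat :=
  g.length + (g.map (fun p => p.2.length)).sum + 1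

def tarjan_recursive (g : List (Int × List Int)) : List (List Int) :=
  (((PySem.Dict.ofList g).keys).foldl
    (fun st v => if st.index.contains v then st
                 else (tjVisit (PySem.Dict.ofList g) (tjFuel g) v st).2.1)
    tjSt0).ret

-- ===== PORT B =====
-- if stack: p = stack[-1][0]; lowlink[p] = min(lowlink[v], lowlink[p])
def tjPopUpd (v : Int) (st1 : TjSt) : List (Int × List Int) → TjSt
  | [] => st1
  | (p, _) :: _ => tjMinLow p v st1

-- the while-stack loop of Source B; a frame is (v, successors not yet looked at);
-- fuel is spent once per frame push, matching tjVisit's one-unit-per-call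
def tjMachine (d : PySem.Dict Int (List Int)) : Nat → List (Int × List Int) → TjSt → TjSt
  | _, [], st => st
  | f, (v, []) :: fs, st =>
    -- iterator exhausted: finish v, pop the frame, min-update the parent's lowlink
    tjMachine d f fs (tjPopUpd v (tjFin v st) fs)
  | f, (v, w :: ws) :: fs, st =>
    if ¬ st.index.contains w then
      match f with
      | 0 => st
      | f' + 1 => tjMachine d f' ((w, tjSuccs d w) :: (v, ws) :: fs) (tjReg w st)
    else if st.sset.contains w then tjMachine d f ((v, ws) :: fs) (tjMinIdx v w st)
    else tjMachine d f ((v, ws) :: fs) st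
termination_by f frames _ => (f, (frames.map (fun p => p.2.length + 1)).sum)
decreasing_by all_goals
  first
  | exact Prod.Lex.left _ _ (Nat.lt_succ_self _)
  | exact Prod.Lex.right _ (by simp only [List.map_cons, List.sum_cons, List.length_cons, List.length_nil]; omega)

def tarjan_recursive_alt (g : List (Int × List Int)) : List (List Int) :=
  (((PySem.Dict.ofList g).keys).foldl
    (fun st root =>
      if st.index.contains root then st
      else tjMachine (PySem.Dict.ofList g) (tjFuel g - 1)
             [(root, tjSuccs (PySem.Dict.ofList g) root)] (tjReg root st))
    tjSt0).ret

-- ===== PRECONDITION & SPEC =====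
def Spec_tarjan_recursive (g : List (Int × List Int)) (out : List (List Int)) : Prop := out = tarjan_recursive_alt g
instance (g : List (Int × List Int)) (out : List (List Int)) : Decidable (Spec_tarjan_recursive g out) := by unfold Spec_tarjan_recursive; infer_instance

-- ===== CLAIM (what is proved, stated in full; the proofs are below) =====
def Claim_equal_tarjan_recursive : Prop := ∀ (g : List (Int × List Int)), Dom_tarjan_recursive g → Spec_tarjan_recursive g (tarjan_recursive g)

-- ===== LEMMAS AND PROOFS =====

-- leftover fuel never exceeds the fuel supplied
theorem tjFuel_le (d : PySem.Dict Int (List Int)) (f : Nat) :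
    (∀ v st, (tjVisit d f v st).2.2 ≤ f) ∧
    (∀ fl, fl ≤ f → ∀ v ws st, (tjLoop d fl v ws st).2.2 ≤ fl) := by
  induction f using Nat.strong_induction_on with
  | _ f ih =>
    have hloop : ∀ fl, fl ≤ f → ∀ v ws st, (tjLoop d fl v ws st).2.2 ≤ fl := by
      intro fl hfl v ws
      induction ws generalizing fl with
      | nil => intro st; simp [tjLoop]
      | cons w ws ihw =>
        intro st
        have hvis : ∀ v' st', (tjVisit d fl v' st').2.2 ≤ fl := by
          intro v' st'
          match fl, hfl with
          | 0, _ => simp [tjVisit]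
          | fl' + 1, hfl =>
            have h1 : fl' < f := by omega
            simp only [tjVisit]
            rcases h : tjLoop d fl' v' (tjSuccs d v') (tjReg v' st') with ⟨b, st2, f2⟩
            have := (ih fl' h1).2 fl' le_rfl v' (tjSuccs d v') (tjReg v' st')
            rw [h] at this
            simp only at this
            cases b <;> simp <;> omega
        simp only [tjLoop]
        by_cases hc : st.index.contains w
        · rw [if_neg (not_not_intro hc)]
          by_cases hs : st.sset.contains w
          · rw [if_pos hs]; exact ihw fl hfl _
          · rw [if_neg hs]; exact ihw fl hfl _
        · rw [if_pos hc]
          rcases h : tjVisit d fl w st with ⟨b, st', f'⟩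
          have hle := hvis w st; rw [h] at hle
          cases b
          · simp
            have h2 : min f' fl ≤ fl := Nat.min_le_right _ _
            exact le_trans (ihw (min f' fl) (le_trans h2 hfl) _) h2
          · simpa using hle
    refine ⟨?_, hloop⟩
    intro v st
    match f with
    | 0 => simp [tjVisit]
    | f' + 1 =>
      simp only [tjVisit]
      rcases h : tjLoop d f' v (tjSuccs d v) (tjReg v st) with ⟨b, st2, f2⟩
      have := hloop f' (by omega) v (tjSuccs d v) (tjReg v st)
      rw [h] at this
      simp only at this
      cases b <;> simp <;> omega

-- one frame of the machine computes exactly one (fuelled) recursive visit-loop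
theorem tjMachine_frame (d : PySem.Dict Int (List Int)) (f : Nat) (v : Int)
    (ws : List Int) (fs : List (Int × List Int)) (st : TjSt) :
    tjMachine d f ((v, ws) :: fs) st =
      match tjLoop d f v ws st with
      | (true, stA, _) => stA
      | (false, st2, f2) => tjMachine d f2 fs (tjPopUpd v (tjFin v st2) fs) := by
  match ws with
  | [] => simp [tjMachine, tjLoop]
  | w :: ws' =>
    by_cases hc : st.index.contains w
    · by_cases hs : w ∈ st.sset
      · rw [show tjMachine d f ((v, w :: ws') :: fs) st
              = tjMachine d f ((v, ws') :: fs) (tjMinIdx v w st) by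
            rw [tjMachine.eq_def]; simp [hc, hs]]
        rw [tjMachine_frame d f v ws' fs (tjMinIdx v w st)]
        simp [tjLoop, hc, hs]
      · rw [show tjMachine d f ((v, w :: ws') :: fs) st
              = tjMachine d f ((v, ws') :: fs) st by
            rw [tjMachine.eq_def]; simp [hc, hs]]
        rw [tjMachine_frame d f v ws' fs st]
        simp [tjLoop, hc, hs]
    · match f with
      | 0 => simp [tjMachine, tjLoop, tjVisit, hc]
      | f' + 1 =>
        rw [show tjMachine d (f' + 1) ((v, w :: ws') :: fs) st
              = tjMachine d f' ((w, tjSuccs d w) :: (v, ws') :: fs) (tjReg w st) by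
            simp [tjMachine, hc]]
        rw [tjMachine_frame d f' w (tjSuccs d w) ((v, ws') :: fs) (tjReg w st)]
        rcases h : tjLoop d f' w (tjSuccs d w) (tjReg w st) with ⟨b, st2, f2⟩
        have hf2 : f2 ≤ f' := by
          have := (tjFuel_le d f').2 f' le_rfl w (tjSuccs d w) (tjReg w st)
          rw [h] at this; simpa using this
        cases b
        · simp only
          rw [show tjPopUpd w (tjFin w st2) ((v, ws') :: fs) = tjMinLow v w (tjFin w st2) from rfl]
          rw [tjMachine_frame d f2 v ws' fs (tjMinLow v w (tjFin w st2))]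
          have hvis : tjVisit d (f' + 1) w st = (false, tjFin w st2, f2) := by
            simp [tjVisit, h]
          have hmin : min f2 (f' + 1) = f2 := by omega
          simp [tjLoop, hc, hvis, hmin]
        · have hvis : tjVisit d (f' + 1) w st = (true, st2, f2) := by
            simp [tjVisit, h]
          simp [tjLoop, hc, hvis]
termination_by (f, ((v, ws) :: fs).map (fun p => p.2.length + 1) |>.sum)
decreasing_by
  · exact Prod.Lex.right _ (by simp only [List.map_cons, List.sum_cons, List.length_cons]; omega)
  · exact Prod.Lex.right _ (by simp only [List.map_cons, List.sum_cons, List.length_cons]; omega)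
  · exact Prod.Lex.left _ _ (Nat.lt_succ_self f')
  · exact Prod.Lex.left _ _ (by omega)

-- one whole root visit
theorem tjRoot_eq (d : PySem.Dict Int (List Int)) (f : Nat) (v : Int) (st : TjSt) :
    tjMachine d f [(v, tjSuccs d v)] (tjReg v st) = (tjVisit d (f + 1) v st).2.1 := by
  rw [tjMachine_frame d f v (tjSuccs d v) [] (tjReg v st)]
  simp only [tjVisit]
  rcases h : tjLoop d f v (tjSuccs d v) (tjReg v st) with ⟨b, st2, f2⟩
  cases b <;> simp [tjMachine, tjPopUpd]

theorem tjDriver_eq (d : PySem.Dict Int (List Int)) (F : Nat) (hF : 1 ≤ F)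
    (ks : List Int) (st : TjSt) :
    ks.foldl (fun st v => if st.index.contains v then st else (tjVisit d F v st).2.1) st
      = ks.foldl (fun st root => if st.index.contains root then st
          else tjMachine d (F - 1) [(root, tjSuccs d root)] (tjReg root st)) st := by
  induction ks generalizing st with
  | nil => rfl
  | cons k ks ih =>
    simp only [List.foldl_cons]
    by_cases hc : st.index.contains k
    · simp [hc, ih]
    · rw [if_neg hc]; rw [if_neg hc]
      rw [tjRoot_eq d (F - 1) k st, Nat.sub_add_cancel hF, ih]

-- ===== VERDICT (by name: the statement is the Claim_ definition above) =====
theorem tarjan_recursive_spec : Claim_equal_tarjan_recursive := by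
  intro g _
  unfold Spec_tarjan_recursive tarjan_recursive tarjan_recursive_alt
  rw [tjDriver_eq (PySem.Dict.ofList g) (tjFuel g) (by unfold tjFuel; omega)]
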